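-- pv_equiv track=rewrite | github.com/JayJihyunKim/rein | plugins/rein-core/hooks/lib/extract-commit-msg.py | find_separator
-- ===== SOURCE A (Python) =====
-- def find_separator(s: str) -> int:
--     """Return index of the first shell separator (&&, ||, ;, |) outside quotes.
--
--     Escape-aware: inside double quotes, ``\\"`` and ``\\$`` and other
--     backslash-escaped chars do not toggle quote state. Single quotes do not
--     process escapes (POSIX). This matches bash word splitting closely enough
--     for our use case (locating the end of the commit invocation in a
--     compound command).
--     """
--     in_dq = in_sq = False
--     i = 0
--     n = len(s)
--     while i < n:
--         c = s[i]
--         # Escaped char inside double quotes: skip both bytes.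
--         if c == "\\" and in_dq and i + 1 < n:
--             i += 2
--             continue
--         # Outside any quotes, a backslash also escapes the next char.
--         if c == "\\" and not in_dq and not in_sq and i + 1 < n:
--             i += 2
--             continue
--         if c == '"' and not in_sq:
--             in_dq = not in_dq
--             i += 1
--             continue
--         if c == "'" and not in_dq:
--             in_sq = not in_sq
--             i += 1
--             continue
--         if not in_dq and not in_sq:
--             if s[i:i + 2] in ("&&", "||"):
--                 return i
--             if c in (";", "|"):
--                 return i
--         i += 1
--     return n
-- ===== SOURCE B (Python) =====
-- def _skip_dquoted(s, i):
--     """Return the index just past the closing unescaped '"', or len(s)."""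
--     n = len(s)
--     while i < n:
--         if s[i] == "\\" and i + 1 < n:
--             i += 2
--         elif s[i] == '"':
--             return i + 1
--         else:
--             i += 1
--     return n
--
--
-- def find_separator(s: str) -> int:
--     # Segment-consuming tokenizer: no quote-state flags; quoted runs are
--     # skipped as whole segments.
--     n = len(s)
--     i = 0
--     while i < n:
--         c = s[i]
--         if c == "\\" and i + 1 < n:
--             i += 2
--         elif c == "'":
--             j = s.find("'", i + 1)
--             i = n if j == -1 else j + 1
--         elif c == '"':
--             i = _skip_dquoted(s, i + 1)
--         elif c == ";" or c == "|":
--             return i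
--         elif c == "&" and i + 1 < n and s[i + 1] == "&":
--             return i
--         else:
--             i += 1
--     return n
-- ===== Notes on version B (the rewrite author's own statement) =====
-- stated objective: idiomatic
-- what changed: Replaced the char-by-char state machine with in_dq/in_sq boolean flags by a segment-consuming tokenizer: quoted runs are skipped as whole segments (single-quoted via str.find, double-quoted via a dedicated escape-aware scanner), so the main loop only ever runs at top level and carries no quote-state flags.
import Mathlib
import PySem

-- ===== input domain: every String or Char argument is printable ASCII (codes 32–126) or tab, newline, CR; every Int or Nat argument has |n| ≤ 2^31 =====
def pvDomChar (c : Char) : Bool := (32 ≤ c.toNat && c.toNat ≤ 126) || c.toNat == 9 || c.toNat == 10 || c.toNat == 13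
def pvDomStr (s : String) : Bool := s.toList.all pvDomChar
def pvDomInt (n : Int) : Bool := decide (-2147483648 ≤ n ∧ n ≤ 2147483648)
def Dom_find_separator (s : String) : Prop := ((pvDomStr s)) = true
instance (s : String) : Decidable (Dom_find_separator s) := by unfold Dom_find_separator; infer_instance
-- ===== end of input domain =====

-- B replaces A's flag-toggling state machine by a segment-consuming tokenizer (same cost; idiomatic).
-- The loops advance i by at least 1 per step, so fuel = cs.length is a pure totality guard
-- (it never changes the computed value on the initial call).

-- ===== PORT A =====
-- A's while loop: index i, flags in_dq / in_sq; branches in A's order.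
-- s[i:i+2] in ("&&","||") is ported by hand as: i+1 < n and the two chars match (exact:
-- the slice has length 2 iff i+1 < n, and equals "&&"/"||" iff both chars match).
def loopA (cs : List Char) (fuel : Nat) (i : Nat) (in_dq in_sq : Bool) : Nat :=
  match fuel with
  | 0 => cs.length
  | fuel + 1 =>
    if h : i < cs.length then
      let c := cs[i]
      if c == '\\' && in_dq && decide (i + 1 < cs.length) then
        loopA cs fuel (i + 2) in_dq in_sq
      else if c == '\\' && !in_dq && !in_sq && decide (i + 1 < cs.length) then
        loopA cs fuel (i + 2) in_dq in_sq
      else if c == '"' && !in_sq then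
        loopA cs fuel (i + 1) (!in_dq) in_sq
      else if c == '\'' && !in_dq then
        loopA cs fuel (i + 1) in_dq (!in_sq)
      else if (!in_dq && !in_sq) &&
          (decide (i + 1 < cs.length) &&
            ((c == '&' && cs.getD (i + 1) ' ' == '&') || (c == '|' && cs.getD (i + 1) ' ' == '|'))) then
        i
      else if (!in_dq && !in_sq) && (c == ';' || c == '|') then
        i
      else
        loopA cs fuel (i + 1) in_dq in_sq
    else
      cs.length

def find_separator (s : String) : Int :=
  Int.ofNat (loopA s.toList s.toList.length 0 false false)

-- ===== PORT B =====
-- B's helper _skip_dquoted: scan past an escape-aware double-quoted run.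
def skipDq (cs : List Char) (fuel : Nat) (i : Nat) : Nat :=
  match fuel with
  | 0 => cs.length
  | fuel + 1 =>
    if h : i < cs.length then
      if cs[i] == '\\' && decide (i + 1 < cs.length) then
        skipDq cs fuel (i + 2)
      else if cs[i] == '"' then
        i + 1
      else
        skipDq cs fuel (i + 1)
    else
      cs.length

-- B's main loop: Python's s.find("'", i+1) is ported as idxOf? on the dropped suffix.
def loopB (cs : List Char) (fuel : Nat) (i : Nat) : Nat :=
  match fuel with
  | 0 => cs.length
  | fuel + 1 =>
    if h : i < cs.length then
      let c := cs[i]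
      if c == '\\' && decide (i + 1 < cs.length) then
        loopB cs fuel (i + 2)
      else if c == '\'' then
        match (cs.drop (i + 1)).idxOf? '\'' with
        | none => cs.length
        | some j => loopB cs fuel (i + 1 + j + 1)
      else if c == '"' then
        loopB cs fuel (skipDq cs cs.length (i + 1))
      else if c == ';' || c == '|' then
        i
      else if c == '&' && decide (i + 1 < cs.length) && cs.getD (i + 1) ' ' == '&' then
        i
      else
        loopB cs fuel (i + 1)
    else
      cs.length

def find_separator_alt (s : String) : Int :=
  Int.ofNat (loopB s.toList s.toList.length 0)

-- ===== PRECONDITION & SPEC =====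
def Spec_find_separator (s : String) (out : Int) : Prop := out = find_separator_alt s
instance (s : String) (out : Int) : Decidable (Spec_find_separator s out) := by unfold Spec_find_separator; infer_instance

-- ===== CLAIM (what is proved, stated in full; the proofs are below) =====
def Claim_equal_find_separator : Prop := ∀ (s : String), Dom_find_separator s → Spec_find_separator s (find_separator s)

-- ===== LEMMAS AND PROOFS =====

theorem loopA_stop (cs : List Char) (fuel i : Nat) (dq sq : Bool) (h : cs.length ≤ i) :
    loopA cs fuel i dq sq = cs.length := by
  cases fuel with
  | zero => rfl
  | succ fuel => rw [loopA, dif_neg (by omega : ¬ i < cs.length)]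

theorem loopB_stop (cs : List Char) (fuel i : Nat) (h : cs.length ≤ i) :
    loopB cs fuel i = cs.length := by
  cases fuel with
  | zero => rfl
  | succ fuel => rw [loopB, dif_neg (by omega : ¬ i < cs.length)]

theorem skipDq_stop (cs : List Char) (fuel i : Nat) (h : cs.length ≤ i) :
    skipDq cs fuel i = cs.length := by
  cases fuel with
  | zero => rfl
  | succ fuel => rw [skipDq, dif_neg (by omega : ¬ i < cs.length)]

-- fuel is a pure totality guard: any two sufficient fuels give the same value
theorem skipDq_fuel (cs : List Char) : ∀ (f g i : Nat), cs.length - i ≤ f → cs.length - i ≤ g →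
    skipDq cs f i = skipDq cs g i := by
  intro f
  induction f with
  | zero =>
    intro g i hf hg
    rw [skipDq_stop cs 0 i (by omega), skipDq_stop cs g i (by omega)]
  | succ f ih =>
    intro g i hf hg
    by_cases h : i < cs.length
    · obtain ⟨g, rfl⟩ : ∃ g', g = g' + 1 := ⟨g - 1, by omega⟩
      rw [skipDq, skipDq, dif_pos h, dif_pos h]
      split_ifs
      · exact ih g (i + 2) (by omega) (by omega)
      · rfl
      · exact ih g (i + 1) (by omega) (by omega)
    · rw [skipDq_stop cs _ i (by omega), skipDq_stop cs g i (by omega)]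

theorem skipDq_step (cs : List Char) (i : Nat) (h : i < cs.length) :
    skipDq cs cs.length i =
      (if (cs[i] == '\\' && decide (i + 1 < cs.length)) = true then skipDq cs cs.length (i + 2)
       else if (cs[i] == '"') = true then i + 1
       else skipDq cs cs.length (i + 1)) := by
  obtain ⟨m, hm⟩ : ∃ m, cs.length = m + 1 := ⟨cs.length - 1, by omega⟩
  conv_lhs => rw [hm, skipDq]
  rw [dif_pos h]
  split_ifs
  · exact skipDq_fuel cs m cs.length (i + 2) (by omega) (by omega)
  · rfl
  · exact skipDq_fuel cs m cs.length (i + 1) (by omega) (by omega)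

theorem loopA_fuel (cs : List Char) : ∀ (f g i : Nat) (dq sq : Bool),
    cs.length - i ≤ f → cs.length - i ≤ g →
    loopA cs f i dq sq = loopA cs g i dq sq := by
  intro f
  induction f with
  | zero =>
    intro g i dq sq hf hg
    rw [loopA_stop cs 0 i dq sq (by omega), loopA_stop cs g i dq sq (by omega)]
  | succ f ih =>
    intro g i dq sq hf hg
    by_cases h : i < cs.length
    · obtain ⟨g, rfl⟩ : ∃ g', g = g' + 1 := ⟨g - 1, by omega⟩
      rw [loopA, loopA, dif_pos h, dif_pos h]
      dsimp only
      split_ifs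
      · exact ih g (i + 2) dq sq (by omega) (by omega)
      · exact ih g (i + 2) dq sq (by omega) (by omega)
      · exact ih g (i + 1) (!dq) sq (by omega) (by omega)
      · exact ih g (i + 1) dq (!sq) (by omega) (by omega)
      · rfl
      · rfl
      · exact ih g (i + 1) dq sq (by omega) (by omega)
    · rw [loopA_stop cs _ i dq sq (by omega), loopA_stop cs g i dq sq (by omega)]

theorem skipDq_ge (cs : List Char) : ∀ (fuel i : Nat), i ≤ cs.length →
    i ≤ skipDq cs fuel i := by
  intro fuel
  induction fuel with
  | zero => intro i hle; exact hle
  | succ fuel ih =>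
    intro i hle
    by_cases h : i < cs.length
    · rw [skipDq, dif_pos h]
      split_ifs
      · by_cases h2 : i + 2 ≤ cs.length
        · have := ih (i + 2) h2; omega
        · rw [skipDq_stop cs fuel (i + 2) (by omega)]; omega
      · omega
      · have := ih (i + 1) (by omega); omega
    · rw [skipDq, dif_neg h]; omega

-- inside double quotes, A's loop lands exactly where skipDq lands
theorem loopA_dq (cs : List Char) : ∀ (f i : Nat), cs.length - i ≤ f →
    loopA cs f i true false = loopA cs cs.length (skipDq cs cs.length i) false false := by
  intro f
  induction f with
  | zero =>
    intro i hf
    rw [loopA_stop cs 0 i _ _ (by omega), skipDq_stop cs _ i (by omega),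
      loopA_stop cs _ _ _ _ le_rfl]
  | succ f ih =>
    intro i hf
    by_cases h : i < cs.length
    · rw [loopA, dif_pos h, skipDq_step cs i h]
      simp only [Bool.not_true, Bool.not_false, Bool.and_true, Bool.and_false,
        Bool.false_and, Bool.false_eq_true, if_false]
      by_cases h1 : (cs[i] == '\\' && decide (i + 1 < cs.length)) = true
      · simp only [h1, if_true]
        exact ih (i + 2) (by omega)
      · simp only [Bool.not_eq_true] at h1
        simp only [h1, Bool.false_eq_true, if_false]
        by_cases h2 : (cs[i] == '"') = true
        · simp only [h2, if_true]
          exact loopA_fuel cs f cs.length (i + 1) false false (by omega) (by omega)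
        · simp only [Bool.not_eq_true] at h2
          simp only [h2, Bool.false_eq_true, if_false]
          exact ih (i + 1) (by omega)
    · rw [loopA_stop cs _ i _ _ (by omega), skipDq_stop cs _ i (by omega),
        loopA_stop cs _ _ _ _ le_rfl]

-- inside single quotes, A's loop scans to the next quote, i.e. follows idxOf?
theorem loopA_sq (cs : List Char) : ∀ (f i : Nat), cs.length - i ≤ f →
    loopA cs f i false true =
      (match (cs.drop i).idxOf? '\'' with
       | none => cs.length
       | some j => loopA cs cs.length (i + j + 1) false false) := by
  intro f
  induction f with
  | zero =>
    intro i hf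
    rw [loopA_stop cs 0 i _ _ (by omega), List.drop_eq_nil_of_le (by omega : cs.length ≤ i)]
    simp [List.idxOf?]
  | succ f ih =>
    intro i hf
    by_cases h : i < cs.length
    · have hdrop : cs.drop i = cs[i] :: cs.drop (i + 1) := List.drop_eq_getElem_cons h
      rw [loopA, dif_pos h, hdrop]
      simp only [List.idxOf?, List.findIdx?_cons]
      by_cases hq : cs[i] = '\''
      · simp only [hq, beq_self_eq_true, if_pos trivial, Bool.not_true, Bool.not_false,
          Bool.and_true, Bool.and_false, Bool.false_and, Bool.false_eq_true, if_false]
        exact loopA_fuel cs f cs.length (i + 1) false false (by omega) (by omega)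
      · have hqf : (cs[i] == '\'') = false := by simp [hq]
        simp only [hqf, Bool.not_true, Bool.not_false, Bool.and_false, Bool.false_and,
          Bool.and_true, Bool.false_eq_true, if_false]
        rw [ih (i + 1) (by omega)]
        rcases hfind : List.findIdx? (fun x => x == '\'') (cs.drop (i + 1)) with _ | j
        · simp [List.idxOf?, hfind]
        · simp only [List.idxOf?, hfind, Option.map_some]
          congr 1
          omega
    · rw [loopA_stop cs _ i _ _ (by omega), List.drop_eq_nil_of_le (by omega : cs.length ≤ i)]
      simp [List.idxOf?]

theorem loopA_eq_loopB (cs : List Char) : ∀ (f i : Nat), cs.length - i ≤ f →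
    loopA cs f i false false = loopB cs f i := by
  intro f
  induction f with
  | zero =>
    intro i hf
    rw [loopA_stop cs 0 i _ _ (by omega), loopB_stop cs 0 i (by omega)]
  | succ f ih =>
    intro i hf
    by_cases h : i < cs.length
    · rw [loopA, dif_pos h, loopB, dif_pos h]
      simp only [Bool.not_false, Bool.and_true, Bool.and_false,
        Bool.false_and, Bool.true_and, Bool.false_eq_true, if_false]
      by_cases h1 : (cs[i] == '\\' && decide (i + 1 < cs.length)) = true
      · have hns : (cs[i] == '\'') = false := by
          simp only [Bool.and_eq_true, beq_iff_eq] at h1; simp [h1.1]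
        have hnd : (cs[i] == '"') = false := by
          simp only [Bool.and_eq_true, beq_iff_eq] at h1; simp [h1.1]
        simp only [h1, if_true, hns, hnd, Bool.false_eq_true, if_false]
        exact ih (i + 2) (by omega)
      · simp only [Bool.not_eq_true] at h1
        simp only [h1, Bool.false_eq_true, if_false]
        by_cases h2 : (cs[i] == '\'') = true
        · have hnd : (cs[i] == '"') = false := by
            simp only [beq_iff_eq] at h2; simp [h2]
          simp only [h2, if_true, hnd, Bool.false_eq_true, if_false]
          rw [loopA_sq cs f (i + 1) (by omega)]
          rcases hfind : (cs.drop (i + 1)).idxOf? '\'' with _ | j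
          · simp
          · simp only []
            rw [loopA_fuel cs cs.length f (i + 1 + j + 1) false false (by omega) (by omega)]
            exact ih (i + 1 + j + 1) (by omega)
        · simp only [Bool.not_eq_true] at h2
          simp only [h2, Bool.false_eq_true, if_false]
          by_cases h3 : (cs[i] == '"') = true
          · simp only [h3, if_true]
            rw [loopA_dq cs f (i + 1) (by omega)]
            have hge := skipDq_ge cs cs.length (i + 1) (by omega)
            rw [loopA_fuel cs cs.length f (skipDq cs cs.length (i + 1)) false false
              (by omega) (by omega)]
            exact ih (skipDq cs cs.length (i + 1)) (by omega)
          · simp only [Bool.not_eq_true] at h3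
            simp only [h3, Bool.false_eq_true, if_false]
            by_cases h4 : (decide (i + 1 < cs.length) &&
                ((cs[i] == '&' && cs.getD (i + 1) ' ' == '&') ||
                 (cs[i] == '|' && cs.getD (i + 1) ' ' == '|'))) = true
            · simp only [h4, if_true]
              simp only [Bool.and_eq_true, Bool.or_eq_true, beq_iff_eq,
                decide_eq_true_eq] at h4
              rcases h4 with ⟨hlt, hca | hcp⟩
              · obtain ⟨hca1, hca2⟩ := hca
                have hsep : (cs[i] == ';' || cs[i] == '|') = false := by
                  simp [hca1]
                simp only [hsep, Bool.false_eq_true, if_false]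
                have hamp : (cs[i] == '&' && decide (i + 1 < cs.length) &&
                    cs.getD (i + 1) ' ' == '&') = true := by
                  rw [hca1, hca2]; simp [hlt]
                simp only [hamp, if_true]
              · have hsep : (cs[i] == ';' || cs[i] == '|') = true := by
                  simp [hcp.1]
                simp [hsep]
            · simp only [Bool.not_eq_true] at h4
              simp only [h4, Bool.false_eq_true, if_false]
              by_cases h5 : (cs[i] == ';' || cs[i] == '|') = true
              · simp [h5]
              · simp only [Bool.not_eq_true] at h5
                simp only [h5, Bool.false_eq_true, if_false]
                have hamp : (cs[i] == '&' && decide (i + 1 < cs.length) &&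
                    cs.getD (i + 1) ' ' == '&') = false := by
                  by_contra hc
                  simp only [Bool.not_eq_false, Bool.and_eq_true] at hc
                  apply Bool.false_ne_true
                  rw [← h4]
                  simp only [hc.1.1, hc.1.2, hc.2, Bool.and_true, Bool.true_or]
                simp only [hamp, Bool.false_eq_true, if_false]
                exact ih (i + 1) (by omega)
    · rw [loopA_stop cs _ i _ _ (by omega), loopB_stop cs _ i (by omega)]

-- ===== VERDICT (by name: the statement is the Claim_ definition above) =====
theorem find_separator_spec : Claim_equal_find_separator := by
  intro s _
  unfold Spec_find_separator find_separator find_separator_alt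
  rw [loopA_eq_loopB s.toList s.toList.length 0 (by omega)]
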